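-- pv_equiv track=rewrite | github.com/PalacioRpo/Estructuras2 | generadorDatos.py | carros
-- ===== SOURCE A (Python) =====
-- def carros(grupo, punto_llegada):
--   if len(grupo) == 0:
--     return punto_llegada
--   else:
--     carro = []
--     nuevocarro = False
--     for dato in grupo:
--       i = 0
--       lendato = len(dato)
--       while i < lendato:
--         if len(carro) == 12:
--           nuevocarro = True
--           break
--         carro.append(dato[0])
--         dato.pop(0)
--         i+=1
--       if nuevocarro:
--         break
--
--     punto_llegada.append(carro)
--     return carros(grupo[1:],punto_llegada)
-- ===== SOURCE B (Python) =====
-- def carros(grupo, punto_llegada):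
--     # One car per group: car k starts at group k and keeps taking elements
--     # from the following groups until it holds 12 (or nothing is left).
--     for start in range(len(grupo)):
--         carro = []
--         for dato in grupo[start:]:
--             while dato and len(carro) < 12:
--                 carro.append(dato.pop(0))
--             if len(carro) == 12:
--                 break
--         punto_llegada.append(carro)
--     return punto_llegada
-- ===== Notes on version B (the rewrite author's own statement) =====
-- stated objective: simpler
-- what changed: Replaces A's recursion with pop(0)/break-flag bookkeeping by a flat iterative 'for start in range(len(grupo))' loop in which car k drains elements from grupo[start:] via a single 'while dato and len(carro) < 12' loop and then breaks when full.
import Mathlib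
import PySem

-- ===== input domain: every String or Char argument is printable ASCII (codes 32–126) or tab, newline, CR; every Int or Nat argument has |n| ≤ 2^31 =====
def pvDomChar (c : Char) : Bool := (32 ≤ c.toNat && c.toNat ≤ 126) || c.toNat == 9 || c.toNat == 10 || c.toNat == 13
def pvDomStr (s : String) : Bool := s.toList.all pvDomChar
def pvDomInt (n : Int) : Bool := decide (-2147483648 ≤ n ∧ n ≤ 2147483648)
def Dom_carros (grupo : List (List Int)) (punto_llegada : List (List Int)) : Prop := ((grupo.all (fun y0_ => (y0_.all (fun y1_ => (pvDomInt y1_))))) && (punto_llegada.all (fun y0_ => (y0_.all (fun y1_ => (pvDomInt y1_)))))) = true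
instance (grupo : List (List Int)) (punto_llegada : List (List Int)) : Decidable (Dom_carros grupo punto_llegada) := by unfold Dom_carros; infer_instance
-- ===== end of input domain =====

-- B replaces A's recursion with pop(0)/break-flag bookkeeping by one iterative loop over
-- starting indices (simpler); equivalence is about the RETURN value only: both Pythons
-- mutate grupo's inner lists and punto_llegada in place.

-- ===== PORT A =====
-- the 'while i < lendato' loop: k counts the remaining iterations (lendato - i);
-- the [] branch is unreachable because the loop is entered with k = dato.length
-- (dato[0]/dato.pop(0) therefore never raise), so the port is exact.
def popLoopA : List Int → List Int → Nat → List Int × List Int × Bool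
  | dato, carro, 0 => (dato, carro, false)
  | dato, carro, k + 1 =>
    if carro.length == 12 then (dato, carro, true)
    else
      match dato with
      | [] => (dato, carro, false)
      | d :: rest => popLoopA rest (carro ++ [d]) k

-- the 'for dato in grupo' loop; returns the (mutated) grupo and carro; stops when nuevocarro
def forLoopA : List (List Int) → List Int → List (List Int) × List Int
  | [], carro => ([], carro)
  | dato :: rest, carro =>
    let r := popLoopA dato carro dato.length
    if r.2.2 then (r.1 :: rest, r.2.1)
    else
      let s := forLoopA rest r.2.1
      (r.1 :: s.1, s.2)

-- needed only for termination of carros (the for loop keeps len(grupo) unchanged)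
theorem forLoopA_fst_length (gs : List (List Int)) (c : List Int) :
    (forLoopA gs c).1.length = gs.length := by
  induction gs generalizing c with
  | nil => simp [forLoopA]
  | cons g rest ih =>
    simp only [forLoopA]
    split <;> simp [ih]

def carros (grupo : List (List Int)) (punto_llegada : List (List Int)) : List (List Int) :=
  match g : grupo with
  | [] => punto_llegada
  | _ :: _ =>
    let r := forLoopA grupo []
    carros r.1.tail (punto_llegada ++ [r.2])
termination_by grupo.length
decreasing_by
  have h := forLoopA_fst_length grupo []
  subst g; simp_all

-- ===== PORT B =====
-- the 'while dato and len(carro) < 12' loop: pops from dato into carro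
def takeLoopB : List Int → List Int → List Int × List Int
  | [], carro => ([], carro)
  | d :: rest, carro =>
    if carro.length < 12 then takeLoopB rest (carro ++ [d])
    else (d :: rest, carro)

-- the 'for dato in grupo[start:]' loop; returns the (mutated) suffix and carro; breaks when full
def forDatoB : List (List Int) → List Int → List (List Int) × List Int
  | [], carro => ([], carro)
  | dato :: rest, carro =>
    let r := takeLoopB dato carro
    if r.2.length == 12 then (r.1 :: rest, r.2)
    else
      let s := forDatoB rest r.2
      (r.1 :: s.1, s.2)

-- the 'for start in range(len(grupo))' loop; state is the (mutated) grupo, out is punto_llegada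
def mainLoopB (start n : Nat) (state out : List (List Int)) : List (List Int) :=
  if start < n then
    let r := forDatoB (state.drop start) []
    mainLoopB (start + 1) n (state.take start ++ r.1) (out ++ [r.2])
  else out
termination_by n - start

def carros_alt (grupo : List (List Int)) (punto_llegada : List (List Int)) : List (List Int) :=
  mainLoopB 0 grupo.length grupo punto_llegada

-- ===== PRECONDITION & SPEC =====
def Spec_carros (grupo : List (List Int)) (punto_llegada : List (List Int)) (out : List (List Int)) : Prop := out = carros_alt grupo punto_llegada
instance (grupo : List (List Int)) (punto_llegada : List (List Int)) (out : List (List Int)) : Decidable (Spec_carros grupo punto_llegada out) := by unfold Spec_carros; infer_instance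

-- ===== CLAIM (what is proved, stated in full; the proofs are below) =====
def Claim_equal_carros : Prop := ∀ (grupo : List (List Int)) (punto_llegada : List (List Int)), Dom_carros grupo punto_llegada → Spec_carros grupo punto_llegada (carros grupo punto_llegada)

-- ===== LEMMAS AND PROOFS =====

-- A's while loop pops t = min(12 - len(carro), len(dato)) elements; the break flag is set
-- exactly when the car got full while elements remained
theorem popLoopA_spec (g c : List Int) (h : c.length ≤ 12) :
    popLoopA g c g.length =
      (g.drop (12 - c.length), c ++ g.take (12 - c.length),
        decide (12 - c.length < g.length)) := by
  induction g generalizing c with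
  | nil => simp [popLoopA]
  | cons d rest ih =>
    simp only [List.length_cons, popLoopA]
    by_cases h12 : c.length = 12
    · have ht : 12 - c.length = 0 := by omega
      simp [h12]
    · have hlt : c.length < 12 := by omega
      obtain ⟨t, ht⟩ : ∃ t, 12 - c.length = t + 1 := ⟨12 - c.length - 1, by omega⟩
      have h' : (c ++ [d]).length ≤ 12 := by simp; omega
      have ht' : 12 - (c ++ [d]).length = t := by simp; omega
      simp only [beq_iff_eq, h12, if_false]
      rw [ih (c ++ [d]) h', ht', ht]
      simp only [List.drop_succ_cons, List.take_succ_cons, Prod.mk.injEq, List.append_assoc,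
        List.singleton_append, true_and]
      exact decide_eq_decide.mpr (by omega)

-- B's while loop pops the same t elements
theorem takeLoopB_spec (g c : List Int) (h : c.length ≤ 12) :
    takeLoopB g c = (g.drop (12 - c.length), c ++ g.take (12 - c.length)) := by
  induction g generalizing c with
  | nil => simp [takeLoopB]
  | cons d rest ih =>
    simp only [takeLoopB]
    by_cases h12 : c.length = 12
    · have ht : 12 - c.length = 0 := by omega
      simp [h12]
    · have hlt : c.length < 12 := by omega
      obtain ⟨t, ht⟩ : ∃ t, 12 - c.length = t + 1 := ⟨12 - c.length - 1, by omega⟩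
      have h' : (c ++ [d]).length ≤ 12 := by simp; omega
      have ht' : 12 - (c ++ [d]).length = t := by simp; omega
      rw [if_pos hlt, ih (c ++ [d]) h', ht', ht]
      simp

-- with a full carro A's for loop pops nothing and leaves every list in place
theorem forLoopA_full (gs : List (List Int)) (c : List Int) (h : c.length = 12) :
    forLoopA gs c = (gs, c) := by
  induction gs with
  | nil => simp [forLoopA]
  | cons g rest ih =>
    have hp := popLoopA_spec g c (by omega)
    have ht : 12 - c.length = 0 := by omega
    rw [ht] at hp
    simp only [List.drop_zero, List.take_zero, List.append_nil] at hp
    simp only [forLoopA, hp]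
    match g with
    | [] => simp [ih]
    | x :: xs => simp

-- A's break-flag for loop and B's break-on-full for loop agree
theorem forLoopA_eq_forDatoB (gs : List (List Int)) (c : List Int) (h : c.length ≤ 12) :
    forLoopA gs c = forDatoB gs c := by
  induction gs generalizing c with
  | nil => simp [forLoopA, forDatoB]
  | cons g rest ih =>
    have hp := popLoopA_spec g c h
    have hq := takeLoopB_spec g c h
    have hlen : (c ++ g.take (12 - c.length)).length = c.length + min (12 - c.length) g.length := by
      simp [List.length_take]
    simp only [forLoopA, forDatoB, hp, hq]
    by_cases hb : 12 - c.length < g.length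
    · have hflag : decide (12 - c.length < g.length) = true := by simp [hb]
      have h12 : ((c ++ g.take (12 - c.length)).length == 12) = true := by
        rw [beq_iff_eq, hlen]; omega
      simp [hflag]
      intro hcon
      exfalso
      rw [beq_iff_eq, hlen] at h12
      omega
    · have hflag : decide (12 - c.length < g.length) = false := by simp [hb]
      by_cases h12 : (c ++ g.take (12 - c.length)).length = 12
      · simp [hflag, forLoopA_full rest _ h12]
        intro hcon
        exfalso
        rw [hlen] at h12
        omega
      · have hle : (c ++ g.take (12 - c.length)).length ≤ 12 := by rw [hlen]; omega
        simp [hflag, ih _ hle]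
        intro hcon
        exfalso
        rw [hlen] at h12
        omega

-- B's for pass keeps the number of lists unchanged
theorem forDatoB_fst_length (gs : List (List Int)) (c : List Int) :
    (forDatoB gs c).1.length = gs.length := by
  induction gs generalizing c with
  | nil => simp [forDatoB]
  | cons g rest ih =>
    simp only [forDatoB]
    split <;> simp [ih]

-- A's recursion on the dropped suffix equals B's indexed main loop
theorem carros_eq_mainLoopB (k : Nat) : ∀ (n start : Nat) (state out : List (List Int)),
    n - start = k → start ≤ n → state.length = n →
    carros (state.drop start) out = mainLoopB start n state out := by
  induction k with
  | zero =>
    intro n start state out hk hle hlen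
    have hs : start = n := by omega
    subst hs
    have hd : state.drop start = [] := by
      rw [← hlen]; exact List.drop_length
    rw [hd, carros, mainLoopB]
    simp
  | succ k ih =>
    intro n start state out hk hle hlen
    have hlt : start < n := by omega
    rw [mainLoopB, if_pos hlt]
    have hne : state.drop start ≠ [] := by
      intro h
      have := List.length_drop (l := state) (i := start)
      rw [h] at this; simp at this; omega
    match hd : state.drop start with
    | [] => exact absurd hd hne
    | x :: xs =>
      rw [carros]
      simp only
      rw [forLoopA_eq_forDatoB _ _ (by simp), ← hd]
      have hlw : (state.take start ++ (forDatoB (state.drop start) []).1).length = n := by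
        rw [List.length_append, forDatoB_fst_length, List.length_take, List.length_drop]
        omega
      have hdrop : (state.take start ++ (forDatoB (state.drop start) []).1).drop (start + 1)
          = (forDatoB (state.drop start) []).1.tail := by
        have hts : (state.take start).length = start := by
          rw [List.length_take]; omega
        rw [List.drop_append, hts]
        have h1 : List.drop (start + 1) (state.take start) = [] :=
          List.drop_eq_nil_of_le (by rw [hts]; omega)
        have h2 : start + 1 - start = 1 := by omega
        rw [h1, h2, List.drop_one]
        simp
      rw [← hdrop]
      exact ih n (start + 1) _ _ (by omega) (by omega) hlw

-- ===== VERDICT (by name: the statement is the Claim_ definition above) =====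
theorem carros_spec : Claim_equal_carros := by
  intro grupo punto_llegada _
  unfold Spec_carros carros_alt
  have h := carros_eq_mainLoopB grupo.length grupo.length 0 grupo punto_llegada rfl (by omega) rfl
  simpa using h
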